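-- pv_equiv track=rewrite | github.com/kittilsenstian-debug/the-hand | theory-tools/algebraic_periodic_table.py | alg_score
-- ===== SOURCE A (Python) =====
-- ALLOWED = {
--     1, 2, 3, 4, 5, 6, 7, 8, 10, 12, 14, 15, 16, 18, 20, 21, 24,
--     26, 27, 28, 30, 33, 36, 37, 40, 43, 45, 48, 52, 54, 56, 60,
--     64, 67, 71, 72, 78, 80, 120, 126, 133, 240, 248, 744
-- }
--
-- SOURCES = {
--     1: "unity", 2: "Z2/vacua", 3: "rep(SM)/triality", 4: "rank(A4)",
--     5: "rank(D5)", 6: "rank(E6)", 7: "rank(E7)", 8: "rank(E8)",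
--     10: "rep(D5)", 12: "h(E6)", 14: "dim(G2)", 15: "dim(su(4))",
--     16: "rep(D5)", 18: "h(E7)", 20: "roots(A4)", 21: "dim(so(7))",
--     24: "dim(A4)", 26: "|sporadic|", 27: "rep(E6)/J3(O)",
--     28: "dim(so(8))/2.Ru", 30: "h(E8)", 33: "3*L(5)",
--     36: "dim(so(9))", 37: "pariah J1", 40: "roots(D5)",
--     43: "pariah J4", 45: "dim(D5)", 48: "240/5",
--     52: "dim(F4)", 54: "2*J3(O)", 56: "rep(E7)",
--     60: "240/4", 64: "4^3", 67: "pariah O'N", 71: "pariah Ly",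
--     72: "roots(E6)", 78: "dim(E6)", 80: "240/3",
--     120: "240/2", 126: "roots(E7)", 133: "dim(E7)",
-- }
--
-- def alg_score(n):
--     if n in ALLOWED:
--         return 3, "EXACT", SOURCES.get(n, "")
--     for a in sorted(ALLOWED):
--         if a < 2: continue
--         if a * a > n: break
--         if n % a == 0:
--             b = n // a
--             if b in ALLOWED and b >= a:
--                 return 2, "PROD", f"{a}*{b}"
--     for a in sorted(ALLOWED):
--         if a >= n: break
--         b = n - a
--         if b in ALLOWED and b >= a:
--             return 1, "SUM", f"{a}+{b}"
--     return 0, "MISS", ""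
-- ===== SOURCE B (Python) =====
-- ALLOWED = {
--     1, 2, 3, 4, 5, 6, 7, 8, 10, 12, 14, 15, 16, 18, 20, 21, 24,
--     26, 27, 28, 30, 33, 36, 37, 40, 43, 45, 48, 52, 54, 56, 60,
--     64, 67, 71, 72, 78, 80, 120, 126, 133, 240, 248, 744
-- }
--
-- SOURCES = {
--     1: "unity", 2: "Z2/vacua", 3: "rep(SM)/triality", 4: "rank(A4)",
--     5: "rank(D5)", 6: "rank(E6)", 7: "rank(E7)", 8: "rank(E8)",
--     10: "rep(D5)", 12: "h(E6)", 14: "dim(G2)", 15: "dim(su(4))",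
--     16: "rep(D5)", 18: "h(E7)", 20: "roots(A4)", 21: "dim(so(7))",
--     24: "dim(A4)", 26: "|sporadic|", 27: "rep(E6)/J3(O)",
--     28: "dim(so(8))/2.Ru", 30: "h(E8)", 33: "3*L(5)",
--     36: "dim(so(9))", 37: "pariah J1", 40: "roots(D5)",
--     43: "pariah J4", 45: "dim(D5)", 48: "240/5",
--     52: "dim(F4)", 54: "2*J3(O)", 56: "rep(E7)",
--     60: "240/4", 64: "4^3", 67: "pariah O'N", 71: "pariah Ly",
--     72: "roots(E6)", 78: "dim(E6)", 80: "240/3",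
--     120: "240/2", 126: "roots(E7)", 133: "dim(E7)",
-- }
--
-- # Tables precomputed once: key -> smallest admissible a (a ascending, setdefault keeps first).
-- PRODUCTS = {}
-- SUMS = {}
-- for _a in sorted(ALLOWED):
--     for _b in sorted(ALLOWED):
--         if _b >= _a:
--             if _a >= 2:
--                 PRODUCTS.setdefault(_a * _b, _a)
--             SUMS.setdefault(_a + _b, _a)
--
-- def alg_score(n):
--     if n in ALLOWED:
--         return 3, "EXACT", SOURCES.get(n, "")
--     a = PRODUCTS.get(n)
--     if a is not None:
--         return 2, "PROD", f"{a}*{n // a}"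
--     a = SUMS.get(n)
--     if a is not None:
--         return 1, "SUM", f"{a}+{n - a}"
--     return 0, "MISS", ""
-- ===== Notes on version B (the rewrite author's own statement) =====
-- stated objective: alternative
-- what changed: A scans sorted(ALLOWED) with break/continue and divisibility tests on every call; B precomputes once two module-level dictionaries (product/sum of two allowed values -> smallest first factor/summand, minimality from ascending setdefault order) so each call is just two constant-size dict lookups.
import Mathlib
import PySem

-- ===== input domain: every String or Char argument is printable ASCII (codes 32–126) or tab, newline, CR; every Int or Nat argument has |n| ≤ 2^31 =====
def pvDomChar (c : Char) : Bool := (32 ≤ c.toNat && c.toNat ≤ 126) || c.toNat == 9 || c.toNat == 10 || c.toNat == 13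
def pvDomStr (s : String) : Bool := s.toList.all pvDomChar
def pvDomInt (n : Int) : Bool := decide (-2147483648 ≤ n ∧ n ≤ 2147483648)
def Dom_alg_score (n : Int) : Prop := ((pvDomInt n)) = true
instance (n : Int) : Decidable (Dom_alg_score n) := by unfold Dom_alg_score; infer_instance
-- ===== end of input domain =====

-- B replaces A's per-call scan-loops by two dictionaries precomputed once from the fixed set
-- (product/sum -> smallest first factor/summand), so each call is plain table lookups (objective: alternative decomposition).

-- ===== PORT A =====
-- module constant ALLOWED (the Python set literal; shared by both ports, like the module globals)
def ALLOWED : PySem.Set Int := PySem.Set.ofList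
  [1, 2, 3, 4, 5, 6, 7, 8, 10, 12, 14, 15, 16, 18, 20, 21, 24,
   26, 27, 28, 30, 33, 36, 37, 40, 43, 45, 48, 52, 54, 56, 60,
   64, 67, 71, 72, 78, 80, 120, 126, 133, 240, 248, 744]

-- module constant SOURCES
def SOURCES : PySem.Dict Int String := PySem.Dict.ofList
  [(1, "unity"), (2, "Z2/vacua"), (3, "rep(SM)/triality"), (4, "rank(A4)"),
   (5, "rank(D5)"), (6, "rank(E6)"), (7, "rank(E7)"), (8, "rank(E8)"),
   (10, "rep(D5)"), (12, "h(E6)"), (14, "dim(G2)"), (15, "dim(su(4))"),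
   (16, "rep(D5)"), (18, "h(E7)"), (20, "roots(A4)"), (21, "dim(so(7))"),
   (24, "dim(A4)"), (26, "|sporadic|"), (27, "rep(E6)/J3(O)"),
   (28, "dim(so(8))/2.Ru"), (30, "h(E8)"), (33, "3*L(5)"),
   (36, "dim(so(9))"), (37, "pariah J1"), (40, "roots(D5)"),
   (43, "pariah J4"), (45, "dim(D5)"), (48, "240/5"),
   (52, "dim(F4)"), (54, "2*J3(O)"), (56, "rep(E7)"),
   (60, "240/4"), (64, "4^3"), (67, "pariah O'N"), (71, "pariah Ly"),
   (72, "roots(E6)"), (78, "dim(E6)"), (80, "240/3"),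
   (120, "240/2"), (126, "roots(E7)"), (133, "dim(E7)")]

-- sorted(ALLOWED) (both loops iterate it; computed once here like Python evaluates sorted(ALLOWED))
def sortedALLOWED : List Int := PySem.List.sorted ALLOWED (fun x => x) false

-- A's first loop: 'for a in sorted(ALLOWED): if a < 2: continue / if a*a > n: break / …'
def prodLoopA (n : Int) : List Int → Option (Int × String × String)
  | [] => none
  | a :: rest =>
    if a < 2 then prodLoopA n rest
    else if a * a > n then none
    else if PySem.Int.mod n a = 0 then
      let b := PySem.Int.floordiv n a
      if ALLOWED.contains b ∧ b ≥ a then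
        some (2, "PROD", PySem.Int.toStr a ++ "*" ++ PySem.Int.toStr b)
      else prodLoopA n rest
    else prodLoopA n rest

-- A's second loop: 'for a in sorted(ALLOWED): if a >= n: break / …'
def sumLoopA (n : Int) : List Int → Option (Int × String × String)
  | [] => none
  | a :: rest =>
    if a ≥ n then none
    else
      let b := n - a
      if ALLOWED.contains b ∧ b ≥ a then
        some (1, "SUM", PySem.Int.toStr a ++ "+" ++ PySem.Int.toStr b)
      else sumLoopA n rest

def alg_score (n : Int) : Int × String × String :=
  if ALLOWED.contains n then (3, "EXACT", SOURCES.getD n "")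
  else
    match prodLoopA n sortedALLOWED with
    | some r => r
    | none =>
      match sumLoopA n sortedALLOWED with
      | some r => r
      | none => (0, "MISS", "")

-- ===== PORT B =====
-- B's precomputed table: PRODUCTS = {}; double loop with setdefault (smallest a wins)
def PRODUCTS : PySem.Dict Int Int :=
  sortedALLOWED.foldl (fun d a =>
    if 2 ≤ a then
      sortedALLOWED.foldl (fun d b => if b ≥ a then PySem.Dict.setdefault d (a * b) a else d) d
    else d) PySem.Dict.empty

-- B's precomputed table: SUMS = {}
def SUMS : PySem.Dict Int Int :=
  sortedALLOWED.foldl (fun d a =>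
    sortedALLOWED.foldl (fun d b => if b ≥ a then PySem.Dict.setdefault d (a + b) a else d) d)
    PySem.Dict.empty

def alg_score_alt (n : Int) : Int × String × String :=
  if ALLOWED.contains n then (3, "EXACT", SOURCES.getD n "")
  else
    match PRODUCTS.get? n with
    | some a => (2, "PROD", PySem.Int.toStr a ++ "*" ++ PySem.Int.toStr (PySem.Int.floordiv n a))
    | none =>
      match SUMS.get? n with
      | some a => (1, "SUM", PySem.Int.toStr a ++ "+" ++ PySem.Int.toStr (n - a))
      | none => (0, "MISS", "")

-- ===== PRECONDITION & SPEC =====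
def Spec_alg_score (n : Int) (out : Int × String × String) : Prop := out = alg_score_alt n
instance (n : Int) (out : Int × String × String) : Decidable (Spec_alg_score n out) := by unfold Spec_alg_score; infer_instance

-- ===== CLAIM (what is proved, stated in full; the proofs are below) =====
def Claim_equal_alg_score : Prop := ∀ (n : Int), Dom_alg_score n → Spec_alg_score n (alg_score n)

-- ===== LEMMAS AND PROOFS =====

-- sorted(ALLOWED) is the (already sorted, duplicate-free) literal itself
set_option maxRecDepth 40000 in
lemma sortedALLOWED_eq : sortedALLOWED = ALLOWED := by decide

set_option maxRecDepth 40000 in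
lemma sortedALLOWED_pairwise : sortedALLOWED.Pairwise (· ≤ ·) := by
  rw [sortedALLOWED_eq]; decide

set_option maxRecDepth 40000 in
lemma sortedALLOWED_pos : ∀ x ∈ sortedALLOWED, (1 : Int) ≤ x := by
  rw [sortedALLOWED_eq]; decide

lemma contains_iff (x : Int) : ALLOWED.contains x = decide (x ∈ sortedALLOWED) := by
  rw [sortedALLOWED_eq]; simp [PySem.Set.contains]

-- the predicate A's product loop effectively searches for (first match = smallest a)
def hitP (n a : Int) : Bool :=
  decide (2 ≤ a ∧ PySem.Int.mod n a = 0 ∧ PySem.Int.floordiv n a ∈ sortedALLOWED ∧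
          PySem.Int.floordiv n a ≥ a)

-- the predicate A's sum loop effectively searches for
def hitS (n a : Int) : Bool :=
  decide (n - a ∈ sortedALLOWED ∧ n - a ≥ a)

lemma prodLoopA_char (n : Int) :
    ∀ l : List Int, l.Pairwise (· ≤ ·) →
      prodLoopA n l = (l.find? (hitP n)).map
        (fun a => (2, "PROD", PySem.Int.toStr a ++ "*" ++ PySem.Int.toStr (PySem.Int.floordiv n a))) := by
  intro l
  induction l with
  | nil => intro _; simp [prodLoopA]
  | cons a rest ih =>
    intro hp
    have hhead : ∀ x ∈ rest, a ≤ x := (List.pairwise_cons.mp hp).1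
    have hrest := (List.pairwise_cons.mp hp).2
    by_cases h1 : a < 2
    · have hha : ¬ hitP n a = true := by simp [hitP]; omega
      rw [List.find?_cons_of_neg hha]
      simp only [prodLoopA, if_pos h1]
      exact ih hrest
    · by_cases h2 : a * a > n
      · have hnone : (a :: rest).find? (hitP n) = none := by
          rw [List.find?_eq_none]
          intro x hx
          have hax : a ≤ x := by
            rcases List.mem_cons.mp hx with rfl | hm
            · exact le_refl x
            · exact hhead x hm
          simp only [hitP, decide_eq_true_eq, not_and]
          intro hx2 hxm _ hxge
          have heq := PySem.Int.floordiv_mul_add_mod n x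
          rw [hxm] at heq
          have h3 : a * a ≤ x * x := mul_le_mul hax hax (by omega) (by omega)
          have h4 : x * x ≤ (PySem.Int.floordiv n x) * x :=
            mul_le_mul_of_nonneg_right hxge (by omega)
          linarith
        simp only [prodLoopA, if_neg h1, if_pos h2, hnone, Option.map_none]
      · by_cases h3 : PySem.Int.mod n a = 0
        · by_cases h4 : ALLOWED.contains (PySem.Int.floordiv n a) ∧ PySem.Int.floordiv n a ≥ a
          · have hm : PySem.Int.floordiv n a ∈ sortedALLOWED := by
              have := h4.1; rw [contains_iff] at this; simpa using this
            have hh : hitP n a = true := by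
              simp only [hitP, decide_eq_true_eq]
              exact ⟨by omega, h3, hm, h4.2⟩
            rw [List.find?_cons_of_pos hh]
            simp only [prodLoopA, if_neg h1, if_neg h2, if_pos h3]
            rw [if_pos h4]
            simp
          · have hh : ¬ hitP n a = true := by
              simp only [hitP, decide_eq_true_eq]
              rintro ⟨_, _, hm, hg⟩
              exact h4 ⟨by rw [contains_iff]; simpa using hm, hg⟩
            rw [List.find?_cons_of_neg hh]
            simp only [prodLoopA, if_neg h1, if_neg h2, if_pos h3]
            rw [if_neg h4]
            exact ih hrest
        · have hh : ¬ hitP n a = true := by simp [hitP, h3]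
          rw [List.find?_cons_of_neg hh]
          simp only [prodLoopA, if_neg h1, if_neg h2, if_neg h3]
          exact ih hrest

lemma sumLoopA_char (n : Int) :
    ∀ l : List Int, (∀ x ∈ l, (1 : Int) ≤ x) → l.Pairwise (· ≤ ·) →
      sumLoopA n l = (l.find? (hitS n)).map
        (fun a => (1, "SUM", PySem.Int.toStr a ++ "+" ++ PySem.Int.toStr (n - a))) := by
  intro l
  induction l with
  | nil => intro _ _; simp [sumLoopA]
  | cons a rest ih =>
    intro hpos hp
    have hhead : ∀ x ∈ rest, a ≤ x := (List.pairwise_cons.mp hp).1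
    have hrest := (List.pairwise_cons.mp hp).2
    have hposr : ∀ x ∈ rest, (1 : Int) ≤ x := fun x hx => hpos x (List.mem_cons_of_mem a hx)
    by_cases h1 : a ≥ n
    · have hnone : (a :: rest).find? (hitS n) = none := by
        rw [List.find?_eq_none]
        intro x hx
        have hax : a ≤ x := by
          rcases List.mem_cons.mp hx with rfl | hm
          · exact le_refl x
          · exact hhead x hm
        have hx1 : (1 : Int) ≤ x := hpos x hx
        simp only [hitS, decide_eq_true_eq, not_and]
        intro hm
        omega
      simp only [sumLoopA, if_pos h1, hnone, Option.map_none]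
    · by_cases h4 : ALLOWED.contains (n - a) ∧ n - a ≥ a
      · have hh : hitS n a = true := by
          simp only [hitS, decide_eq_true_eq]
          exact ⟨by have := h4.1; rw [contains_iff] at this; simpa using this, h4.2⟩
        rw [List.find?_cons_of_pos hh]
        simp only [sumLoopA, if_neg h1]
        rw [if_pos h4]
        simp
      · have hh : ¬ hitS n a = true := by
          simp only [hitS, decide_eq_true_eq]
          rintro ⟨hm, hg⟩
          exact h4 ⟨by rw [contains_iff]; simpa using hm, hg⟩
        rw [List.find?_cons_of_neg hh]
        simp only [sumLoopA, if_neg h1]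
        rw [if_neg h4]
        exact ih hposr hrest

-- B side: get? of a setdefault fold = first matching pair in generation order

lemma get?_setdefault (d : PySem.Dict Int Int) (k k' v : Int) :
    (PySem.Dict.setdefault d k v).get? k' = (d.get? k').or (if k' = k then some v else none) := by
  unfold PySem.Dict.setdefault
  by_cases hc : d.contains k = true
  · rw [if_pos hc]
    by_cases hk : k' = k
    · subst hk
      rw [PySem.Dict.contains_eq_isSome_get?] at hc
      rcases Option.isSome_iff_exists.mp hc with ⟨w, hw⟩
      simp [hw]
    · simp [hk]
  · rw [if_neg hc]
    show (PySem.Dict.get? _ k') = _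
    unfold PySem.Dict.get?
    simp only [List.find?_append]
    by_cases hk : k' = k
    · subst hk
      rcases h : (List.find? (fun p => p.1 == k') d.items) with _ | p
      · simp [h, List.find?]
      · simp [h, List.find?]
    · have hkk : (k == k') = false := by simp; exact Ne.symm hk
      simp [hkk, List.find?, hk]

lemma innerP (n a : Int) :
    ∀ (bs : List Int) (d : PySem.Dict Int Int),
      (bs.foldl (fun d b => if b ≥ a then PySem.Dict.setdefault d (a * b) a else d) d).get? n
      = (d.get? n).or (if ∃ b ∈ bs, b ≥ a ∧ a * b = n then some a else none) := by
  intro bs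
  induction bs with
  | nil => intro d; simp
  | cons b bs ih =>
    intro d
    by_cases hb : b ≥ a
    · simp only [List.foldl_cons, if_pos hb]
      rw [ih, get?_setdefault]
      by_cases he : a * b = n
      · have hex : ∃ x ∈ b :: bs, x ≥ a ∧ a * x = n := ⟨b, List.mem_cons_self, hb, he⟩
        rw [if_pos hex, if_pos he.symm, Option.or_assoc]
        rcases hbs : (if ∃ x ∈ bs, x ≥ a ∧ a * x = n then some a else none) with _ | w
        · simp
        · have : w = a := by
            by_cases h : ∃ x ∈ bs, x ≥ a ∧ a * x = n
            · rw [if_pos h] at hbs; exact (Option.some_inj.mp hbs).symm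
            · rw [if_neg h] at hbs; cases hbs
          subst this; simp
      · have : (∃ x ∈ b :: bs, x ≥ a ∧ a * x = n) ↔ (∃ x ∈ bs, x ≥ a ∧ a * x = n) := by
          constructor
          · rintro ⟨x, hx, hxa, hxe⟩
            rcases List.mem_cons.mp hx with rfl | hm
            · exact absurd hxe he
            · exact ⟨x, hm, hxa, hxe⟩
          · rintro ⟨x, hx, hxa, hxe⟩; exact ⟨x, List.mem_cons_of_mem b hx, hxa, hxe⟩
        rw [if_neg (fun h => he h.symm), Option.or_none]
        simp only [this]
    · simp only [List.foldl_cons, if_neg hb]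
      rw [ih]
      have : (∃ x ∈ b :: bs, x ≥ a ∧ a * x = n) ↔ (∃ x ∈ bs, x ≥ a ∧ a * x = n) := by
        constructor
        · rintro ⟨x, hx, hxa, hxe⟩
          rcases List.mem_cons.mp hx with rfl | hm
          · exact absurd hxa hb
          · exact ⟨x, hm, hxa, hxe⟩
        · rintro ⟨x, hx, hxa, hxe⟩; exact ⟨x, List.mem_cons_of_mem b hx, hxa, hxe⟩
      simp only [this]

lemma innerS (n a : Int) :
    ∀ (bs : List Int) (d : PySem.Dict Int Int),
      (bs.foldl (fun d b => if b ≥ a then PySem.Dict.setdefault d (a + b) a else d) d).get? n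
      = (d.get? n).or (if ∃ b ∈ bs, b ≥ a ∧ a + b = n then some a else none) := by
  intro bs
  induction bs with
  | nil => intro d; simp
  | cons b bs ih =>
    intro d
    by_cases hb : b ≥ a
    · simp only [List.foldl_cons, if_pos hb]
      rw [ih, get?_setdefault]
      by_cases he : a + b = n
      · have hex : ∃ x ∈ b :: bs, x ≥ a ∧ a + x = n := ⟨b, List.mem_cons_self, hb, he⟩
        rw [if_pos hex, if_pos he.symm, Option.or_assoc]
        rcases hbs : (if ∃ x ∈ bs, x ≥ a ∧ a + x = n then some a else none) with _ | w
        · simp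
        · have : w = a := by
            by_cases h : ∃ x ∈ bs, x ≥ a ∧ a + x = n
            · rw [if_pos h] at hbs; exact (Option.some_inj.mp hbs).symm
            · rw [if_neg h] at hbs; cases hbs
          subst this; simp
      · have : (∃ x ∈ b :: bs, x ≥ a ∧ a + x = n) ↔ (∃ x ∈ bs, x ≥ a ∧ a + x = n) := by
          constructor
          · rintro ⟨x, hx, hxa, hxe⟩
            rcases List.mem_cons.mp hx with rfl | hm
            · exact absurd hxe he
            · exact ⟨x, hm, hxa, hxe⟩
          · rintro ⟨x, hx, hxa, hxe⟩; exact ⟨x, List.mem_cons_of_mem b hx, hxa, hxe⟩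
        rw [if_neg (fun h => he h.symm), Option.or_none]
        simp only [this]
    · simp only [List.foldl_cons, if_neg hb]
      rw [ih]
      have : (∃ x ∈ b :: bs, x ≥ a ∧ a + x = n) ↔ (∃ x ∈ bs, x ≥ a ∧ a + x = n) := by
        constructor
        · rintro ⟨x, hx, hxa, hxe⟩
          rcases List.mem_cons.mp hx with rfl | hm
          · exact absurd hxa hb
          · exact ⟨x, hm, hxa, hxe⟩
        · rintro ⟨x, hx, hxa, hxe⟩; exact ⟨x, List.mem_cons_of_mem b hx, hxa, hxe⟩
      simp only [this]

lemma outerP (n : Int) :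
    ∀ (as : List Int) (d : PySem.Dict Int Int),
      (as.foldl (fun d a =>
        if 2 ≤ a then
          sortedALLOWED.foldl (fun d b => if b ≥ a then PySem.Dict.setdefault d (a * b) a else d) d
        else d) d).get? n
      = (d.get? n).or
          (as.find? (fun a => decide (2 ≤ a ∧ ∃ b ∈ sortedALLOWED, b ≥ a ∧ a * b = n))) := by
  intro as
  induction as with
  | nil => intro d; simp
  | cons a as ih =>
    intro d
    by_cases h2 : 2 ≤ a
    · simp only [List.foldl_cons, if_pos h2]
      rw [ih, innerP]
      by_cases hex : ∃ b ∈ sortedALLOWED, b ≥ a ∧ a * b = n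
      · rw [List.find?_cons_of_pos (by simp [h2, hex]), if_pos hex, Option.or_assoc]
        simp
      · rw [List.find?_cons_of_neg (by simp [h2, hex]), if_neg hex, Option.or_none]
    · simp only [List.foldl_cons, if_neg h2]
      rw [ih, List.find?_cons_of_neg (by simp [h2])]

lemma outerS (n : Int) :
    ∀ (as : List Int) (d : PySem.Dict Int Int),
      (as.foldl (fun d a =>
        sortedALLOWED.foldl (fun d b => if b ≥ a then PySem.Dict.setdefault d (a + b) a else d) d) d).get? n
      = (d.get? n).or
          (as.find? (fun a => decide (∃ b ∈ sortedALLOWED, b ≥ a ∧ a + b = n))) := by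
  intro as
  induction as with
  | nil => intro d; simp
  | cons a as ih =>
    intro d
    simp only [List.foldl_cons]
    rw [ih, innerS]
    by_cases hex : ∃ b ∈ sortedALLOWED, b ≥ a ∧ a + b = n
    · rw [List.find?_cons_of_pos (by simp [hex]), if_pos hex, Option.or_assoc]
      simp
    · rw [List.find?_cons_of_neg (by simp [hex]), if_neg hex, Option.or_none]

-- the two predicates coincide with the loop predicates
lemma hitP_fun_eq (n : Int) :
    (fun a => decide (2 ≤ a ∧ ∃ b ∈ sortedALLOWED, b ≥ a ∧ a * b = n)) = hitP n := by
  funext a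
  by_cases h2 : 2 ≤ a
  · simp only [hitP, decide_eq_decide]
    constructor
    · rintro ⟨_, b, hb, hba, hab⟩
      have ha0 : (0 : Int) < a := by omega
      have hd : PySem.Int.floordiv n a = b := by
        rw [PySem.Int.floordiv_eq_iff_of_pos ha0]
        constructor
        · nlinarith
        · nlinarith
      refine ⟨h2, ?_, ?_, ?_⟩
      · rw [PySem.Int.mod_eq_zero_iff_dvd]; exact ⟨b, hab.symm⟩
      · rw [hd]; exact hb
      · rw [hd]; exact hba
    · rintro ⟨_, hm, hmem, hge⟩
      refine ⟨h2, PySem.Int.floordiv n a, hmem, hge, ?_⟩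
      have heq := PySem.Int.floordiv_mul_add_mod n a
      rw [hm] at heq
      linarith [mul_comm (PySem.Int.floordiv n a) a]
  · simp [hitP, h2]

lemma hitS_fun_eq (n : Int) :
    (fun a => decide (∃ b ∈ sortedALLOWED, b ≥ a ∧ a + b = n)) = hitS n := by
  funext a
  simp only [hitS, decide_eq_decide]
  constructor
  · rintro ⟨b, hb, hba, hab⟩
    have : b = n - a := by omega
    subst this
    exact ⟨hb, hba⟩
  · rintro ⟨hm, hg⟩
    exact ⟨n - a, hm, hg, by omega⟩

lemma PRODUCTS_char (n : Int) : PRODUCTS.get? n = sortedALLOWED.find? (hitP n) := by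
  unfold PRODUCTS
  rw [outerP]
  rw [hitP_fun_eq]
  simp [PySem.Dict.get?_empty]

lemma SUMS_char (n : Int) : SUMS.get? n = sortedALLOWED.find? (hitS n) := by
  unfold SUMS
  rw [outerS]
  rw [hitS_fun_eq]
  simp [PySem.Dict.get?_empty]

theorem alg_eq (n : Int) : alg_score n = alg_score_alt n := by
  unfold alg_score alg_score_alt
  by_cases hc : ALLOWED.contains n = true
  · rw [if_pos hc, if_pos hc]
  · rw [if_neg hc, if_neg hc]
    rw [prodLoopA_char n sortedALLOWED sortedALLOWED_pairwise,
        sumLoopA_char n sortedALLOWED sortedALLOWED_pos sortedALLOWED_pairwise,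
        PRODUCTS_char, SUMS_char]
    cases sortedALLOWED.find? (hitP n) with
    | some a => simp
    | none =>
      cases sortedALLOWED.find? (hitS n) with
      | some a => simp
      | none => simp

-- ===== VERDICT (by name: the statement is the Claim_ definition above) =====
theorem alg_score_spec : Claim_equal_alg_score := by
  intro n _
  unfold Spec_alg_score
  exact alg_eq n
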